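-- pv_equiv track=rewrite | github.com/a-rushi/Web_Search_Engine | invidx_cons.py | encode_c1
-- ===== SOURCE A (Python) =====
-- def encode_c1(gap_encoded):
--     encoded_list = []
--     for doc_id in gap_encoded:
--         block_no = 0
--         encoded = []
--         while(doc_id > 0):
--             temp_val = doc_id%128
--             doc_id = doc_id//128
--             if(block_no > 0):
--                 temp_val = temp_val + 128
--             encoded.append(temp_val)
--             block_no = block_no + 1
--         encoded.reverse()
--         for term in encoded:
--             encoded_list.append(term)
--     return encoded_list
-- ===== SOURCE B (Python) =====
-- def encode_c1(gap_encoded):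
--     # Emit each doc_id's 7-bit digits directly most-significant-first using a
--     # running place value p, so no per-element temp list and no reverse.
--     out = []
--     for doc_id in gap_encoded:
--         p = 1
--         while p * 128 <= doc_id:
--             p *= 128
--         while p > 1:
--             out.append(doc_id // p % 128 + 128)
--             p //= 128
--         if doc_id > 0:
--             out.append(doc_id % 128)
--     return out
-- ===== Notes on version B (the rewrite author's own statement) =====
-- stated objective: alternative
-- what changed: A collects each doc_id's 7-bit digits least-significant-first into a temp list and reverses it before extending the output; B finds the top place value with a running power p and emits digits most-significant-first straight into the output, with no temp list and no reverse.
import Mathlib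
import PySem

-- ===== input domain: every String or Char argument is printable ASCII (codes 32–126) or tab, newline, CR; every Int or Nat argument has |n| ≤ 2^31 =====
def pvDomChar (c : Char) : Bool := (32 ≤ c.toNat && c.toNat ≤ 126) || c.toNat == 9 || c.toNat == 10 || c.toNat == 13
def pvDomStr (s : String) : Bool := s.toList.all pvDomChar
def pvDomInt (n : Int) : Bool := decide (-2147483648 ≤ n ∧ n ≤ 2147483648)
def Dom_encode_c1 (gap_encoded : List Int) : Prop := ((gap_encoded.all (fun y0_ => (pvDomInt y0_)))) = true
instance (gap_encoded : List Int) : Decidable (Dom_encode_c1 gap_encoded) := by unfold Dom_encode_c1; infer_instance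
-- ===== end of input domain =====

-- B emits each doc_id's 7-bit digits most-significant-first via a running place value,
-- instead of A's build-low-to-high-then-reverse; same output, no temp list per element.

-- ===== PORT A =====
-- inner while loop of A: appends doc_id's 7-bit digits low-to-high, marking all but the first
def encOneA (doc_id : Int) (block_no : Int) (encoded : List Int) : List Int :=
  if _h : doc_id > 0 then
    let temp_val := PySem.Int.mod doc_id 128
    let doc_id' := PySem.Int.floordiv doc_id 128
    let temp_val := if block_no > 0 then temp_val + 128 else temp_val
    encOneA doc_id' (block_no + 1) (encoded ++ [temp_val])
  else encoded
termination_by doc_id.toNat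
decreasing_by
  simp only [PySem.Int.floordiv_eq_ediv_of_pos (by norm_num : (0:Int) < 128)]
  omega

def encode_c1 (gap_encoded : List Int) : List Int :=
  gap_encoded.foldl (fun encoded_list doc_id =>
    encoded_list ++ (encOneA doc_id 0 []).reverse) []

-- ===== PORT B =====
-- first while loop of B: grow p by factors of 128 while p*128 <= doc_id
-- (0 < p in the guard is a totality guard only: B always starts from p = 1)
def growP (doc_id : Int) (p : Int) : Int :=
  if _h : p * 128 ≤ doc_id ∧ 0 < p then growP doc_id (p * 128) else p
termination_by (doc_id - p).toNat
decreasing_by omega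

-- second while loop of B: emit marked digits most-significant-first
def emitB (doc_id : Int) (p : Int) (out : List Int) : List Int :=
  if _h : p > 1 then
    emitB doc_id (PySem.Int.floordiv p 128)
      (out ++ [PySem.Int.mod (PySem.Int.floordiv doc_id p) 128 + 128])
  else out
termination_by p.toNat
decreasing_by
  simp only [PySem.Int.floordiv_eq_ediv_of_pos (by norm_num : (0:Int) < 128)]
  omega

def encode_c1_alt (gap_encoded : List Int) : List Int :=
  gap_encoded.foldl (fun out doc_id =>
    let p := growP doc_id 1
    let out1 := emitB doc_id p out
    if doc_id > 0 then out1 ++ [PySem.Int.mod doc_id 128] else out1) []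

-- ===== PRECONDITION & SPEC =====
def Spec_encode_c1 (gap_encoded : List Int) (out : List Int) : Prop := out = encode_c1_alt gap_encoded
instance (gap_encoded : List Int) (out : List Int) : Decidable (Spec_encode_c1 gap_encoded out) := by unfold Spec_encode_c1; infer_instance

-- ===== CLAIM (what is proved, stated in full; the proofs are below) =====
def Claim_equal_encode_c1 : Prop := ∀ (gap_encoded : List Int), Dom_encode_c1 gap_encoded → Spec_encode_c1 gap_encoded (encode_c1 gap_encoded)

-- ===== LEMMAS AND PROOFS =====

-- canonical high-to-low digit list (proof-only)
def canonHi (m : Int) : List Int :=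
  if _h : m > 0 then canonHi (PySem.Int.floordiv m 128) ++ [PySem.Int.mod m 128 + 128] else []
termination_by m.toNat
decreasing_by
  simp only [PySem.Int.floordiv_eq_ediv_of_pos (by norm_num : (0:Int) < 128)]
  omega

def canon (n : Int) : List Int :=
  if n > 0 then canonHi (PySem.Int.floordiv n 128) ++ [PySem.Int.mod n 128] else []

-- number of 128-ary digits
def cnt (m : Int) : Nat :=
  if _h : m > 0 then cnt (PySem.Int.floordiv m 128) + 1 else 0
termination_by m.toNat
decreasing_by
  simp only [PySem.Int.floordiv_eq_ediv_of_pos (by norm_num : (0:Int) < 128)]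
  omega

-- the k highest marked digits of m, most-significant-first
def hiK (m : Int) : Nat → List Int
  | 0 => []
  | Nat.succ k => (PySem.Int.mod (PySem.Int.floordiv m ((128:Int)^k)) 128 + 128) :: hiK m k

theorem fd_pos (a : Int) : PySem.Int.floordiv a 128 = a / 128 :=
  PySem.Int.floordiv_eq_ediv_of_pos (by norm_num)

theorem fd_pow (a : Int) (k : Nat) : PySem.Int.floordiv a ((128:Int)^k) = a / 128^k :=
  PySem.Int.floordiv_eq_ediv_of_pos (pow_pos (by norm_num) k)

theorem one_lt_pow128 (k : Nat) : (1:Int) < 128^(k+1) :=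
  lt_of_lt_of_le (by norm_num) (le_self_pow₀ (by norm_num) (by omega))

theorem div_div_pow (n : Int) (k : Nat) : (n / 128) / 128^k = n / 128^(k+1) := by
  rw [Int.ediv_ediv_of_nonneg (by norm_num), pow_succ']

-- A's loop with accumulator prepended
theorem encOneA_acc (fuel : Nat) : ∀ (n b : Int) (acc : List Int), n.toNat ≤ fuel →
    encOneA n b acc = acc ++ encOneA n b [] := by
  induction fuel with
  | zero =>
    intro n b acc h
    have hn : ¬ n > 0 := by omega
    rw [encOneA]; conv_rhs => rw [encOneA]
    simp [hn]
  | succ fuel ih =>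
    intro n b acc h
    rw [encOneA]; conv_rhs => rw [encOneA]
    by_cases hn : n > 0
    · simp only [hn, dif_pos]
      rw [ih _ _ (acc ++ _) (by rw [fd_pos]; omega),
          ih _ _ ([] ++ _) (by rw [fd_pos]; omega)]
      simp
    · simp [hn]

-- A's inner digits (any positive block_no), reversed, are the canonical marked digits
theorem encOneA_rev (fuel : Nat) : ∀ (m b : Int), m.toNat ≤ fuel → 0 < b →
    (encOneA m b []).reverse = canonHi m := by
  induction fuel with
  | zero =>
    intro m b h hb
    have hm : ¬ m > 0 := by omega
    rw [encOneA, canonHi]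
    simp [hm]
  | succ fuel ih =>
    intro m b h hb
    rw [encOneA]; rw [canonHi]
    by_cases hm : m > 0
    · simp only [hm, dif_pos]
      have hb' : b > 0 := hb
      simp only [hb', if_pos]
      rw [encOneA_acc fuel _ _ _ (by rw [fd_pos]; omega)]
      simp only [List.nil_append, List.reverse_append, List.reverse_cons, List.reverse_nil]
      rw [ih (PySem.Int.floordiv m 128) (b + 1) (by rw [fd_pos]; omega) (by omega)]
    · simp [hm]

-- per-element value of A
theorem encOneA_canon (n : Int) : (encOneA n 0 []).reverse = canon n := by
  rw [encOneA, canon]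
  by_cases hn : n > 0
  · simp only [hn, dif_pos, if_pos]
    rw [encOneA_acc (PySem.Int.floordiv n 128).toNat _ _ _ le_rfl]
    simp only [List.nil_append, List.reverse_append, List.reverse_cons, List.reverse_nil]
    rw [encOneA_rev (PySem.Int.floordiv n 128).toNat _ (0 + 1) le_rfl (by norm_num)]
    simp
  · simp [hn]

-- B's emit loop at p = 128^k produces the k highest marked digits of n/128
theorem emitB_hiK (k : Nat) : ∀ (n : Int) (out : List Int), 0 ≤ n →
    emitB n ((128:Int)^k) out = out ++ hiK (n / 128) k := by
  induction k with
  | zero =>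
    intro n out hn
    rw [emitB]
    simp [hiK]
  | succ k ih =>
    intro n out hn
    rw [emitB]
    have h1 : ((128:Int)^(k+1)) > 1 := one_lt_pow128 k
    simp only [h1, dif_pos]
    have hp : PySem.Int.floordiv ((128:Int)^(k+1)) 128 = 128^k := by
      rw [fd_pos, pow_succ, Int.mul_ediv_cancel _ (by norm_num)]
    rw [hp, ih _ _ hn, hiK]
    have hd : PySem.Int.floordiv n ((128:Int)^(k+1)) =
        PySem.Int.floordiv (n / 128) ((128:Int)^k) := by
      rw [fd_pow, fd_pow, div_div_pow]
    rw [hd]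
    simp

-- peeling the least-significant digit off hiK
theorem hiK_succ (k : Nat) : ∀ (m : Int),
    hiK m (k+1) = hiK (m / 128) k ++ [PySem.Int.mod m 128 + 128] := by
  induction k with
  | zero =>
    intro m
    simp only [hiK, pow_zero, List.nil_append]
    rw [show PySem.Int.floordiv m 1 = m from by
      rw [PySem.Int.floordiv_eq_ediv_of_pos one_pos, Int.ediv_one]]
  | succ k ih =>
    intro m
    rw [show hiK m (k+1+1) = _ :: hiK m (k+1) from rfl, ih m,
        show hiK (m/128) (k+1) = _ :: hiK (m/128) k from rfl]
    simp only [List.cons_append, List.cons.injEq, and_true]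
    rw [fd_pow, fd_pow, div_div_pow]

-- canonical digits as hiK at the exact digit count
theorem canonHi_hiK (fuel : Nat) : ∀ (m : Int), m.toNat ≤ fuel → canonHi m = hiK m (cnt m) := by
  induction fuel with
  | zero =>
    intro m h
    have hm : ¬ m > 0 := by omega
    rw [canonHi, cnt]
    simp [hm, hiK]
  | succ fuel ih =>
    intro m h
    rw [canonHi, cnt]
    by_cases hm : m > 0
    · simp only [hm, dif_pos]
      rw [ih _ (by rw [fd_pos]; omega), fd_pos, hiK_succ]
    · simp [hm, hiK]

-- cnt of a nonneg quotient is zero iff it is below the power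
theorem growP_pow (c : Nat) : ∀ (j : Nat) (n : Int), 0 ≤ n →
    cnt (n / 128^(j+1)) = c → growP n ((128:Int)^j) = 128^(j + c) := by
  induction c with
  | zero =>
    intro j n hn hc
    have hq : ¬ (n / 128^(j+1) > 0) := by
      intro hpos
      rw [cnt] at hc; simp [hpos] at hc
    have hlt : n < 128^(j+1) := by
      by_contra hge
      exact hq (lt_of_lt_of_le zero_lt_one
        ((Int.le_ediv_iff_mul_le (pow_pos (by norm_num) (j+1))).mpr (by rw [one_mul]; omega)))
    rw [growP]
    have hng : ¬ ((128:Int)^j * 128 ≤ n ∧ 0 < (128:Int)^j) := by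
      rw [← pow_succ]; intro ⟨h1, _⟩; omega
    rw [dif_neg hng, Nat.add_zero]
  | succ c ih =>
    intro j n hn hc
    have hq : n / 128^(j+1) > 0 := by
      by_contra hnp
      rw [cnt] at hc; simp [hnp] at hc
    have hge : (128:Int)^(j+1) ≤ n := by
      by_contra hlt
      have : n / 128^(j+1) = 0 := Int.ediv_eq_zero_of_lt hn (by omega)
      omega
    rw [growP]
    have hg : ((128:Int)^j * 128 ≤ n ∧ 0 < (128:Int)^j) :=
      ⟨by rw [← pow_succ]; exact hge, pow_pos (by norm_num) j⟩
    simp only [hg, dif_pos, and_true]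
    rw [← pow_succ]
    have hc' : cnt (n / 128^(j+1+1)) = c := by
      rw [cnt] at hc
      simp only [hq, dif_pos, Nat.add_right_cancel_iff] at hc
      rw [← hc, fd_pos, Int.ediv_ediv_of_nonneg (by positivity), ← pow_succ]
    rw [ih (j+1) n hn hc']
    congr 1
    omega

-- per-element value of B
theorem emitB_canon (n : Int) (out : List Int) :
    (if n > 0 then emitB n (growP n 1) out ++ [PySem.Int.mod n 128]
     else emitB n (growP n 1) out) = out ++ canon n := by
  by_cases hn : n > 0
  · have hp : growP n 1 = (128:Int)^(cnt (n / 128)) := by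
      have := growP_pow (cnt (n / 128^(0+1))) 0 n (by omega) rfl
      simpa using this
    simp only [hn, if_pos, canon]
    rw [hp, emitB_hiK _ _ _ (by omega),
        canonHi_hiK (PySem.Int.floordiv n 128).toNat _ le_rfl, fd_pos]
    simp
  · have hp : growP n 1 = 1 := by
      rw [growP, dif_neg (by intro ⟨h1, _⟩; omega : ¬ ((1:Int) * 128 ≤ n ∧ (0:Int) < 1))]
    simp only [hn, if_false, hp, canon]
    rw [emitB]
    simp

theorem fold_eq (xs : List Int) : ∀ (acc : List Int),
    xs.foldl (fun encoded_list doc_id => encoded_list ++ (encOneA doc_id 0 []).reverse) acc =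
    xs.foldl (fun out doc_id =>
      let p := growP doc_id 1
      let out1 := emitB doc_id p out
      if doc_id > 0 then out1 ++ [PySem.Int.mod doc_id 128] else out1) acc := by
  induction xs with
  | nil => intro acc; rfl
  | cons d xs ih =>
    intro acc
    simp only [List.foldl_cons]
    rw [encOneA_canon, emitB_canon]
    exact ih _

-- ===== VERDICT (by name: the statement is the Claim_ definition above) =====
theorem encode_c1_spec : Claim_equal_encode_c1 := by
  intro gap_encoded _
  unfold Spec_encode_c1 encode_c1 encode_c1_alt
  exact fold_eq gap_encoded []
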